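-- pv_equiv track=rewrite | github.com/wmjones/amy-project | src/preprocessing/segmenter.py | _group_intersections_to_tables
-- ===== SOURCE A (Python) =====
-- from typing import Dict, Any, List, Optional, Tuple
--
-- def _group_intersections_to_tables(
--
--     intersections: List[Tuple[int, int]]
-- ) -> List[Tuple[int, int, int, int]]:
--     """Group intersection points into table bounding boxes.
--
--     Args:
--         intersections: List of intersection points
--
--     Returns:
--         List of table bounding boxes
--     """
--     if not intersections:
--         return []
--
--     # Simple clustering - find bounding box of nearby intersections
--     tables = []
--
--     # Sort intersections by position
--     intersections.sort()
--
--     # Find clusters of intersections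
--     clusters = []
--     current_cluster = [intersections[0]]
--
--     for i in range(1, len(intersections)):
--         x, y = intersections[i]
--         last_x, last_y = current_cluster[-1]
--
--         # If points are close, add to current cluster
--         if abs(x - last_x) < 100 and abs(y - last_y) < 100:
--             current_cluster.append((x, y))
--         else:
--             if len(current_cluster) > 4:  # Minimum for table
--                 clusters.append(current_cluster)
--             current_cluster = [(x, y)]
--
--     if len(current_cluster) > 4:
--         clusters.append(current_cluster)
--
--     # Convert clusters to bounding boxes
--     for cluster in clusters:
--         xs = [p[0] for p in cluster]
--         ys = [p[1] for p in cluster]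
--
--         min_x, max_x = min(xs), max(xs)
--         min_y, max_y = min(ys), max(ys)
--
--         tables.append((min_x, min_y, max_x - min_x, max_y - min_y))
--
--     return tables
-- ===== SOURCE B (Python) =====
-- def _group_intersections_to_tables(intersections):
--     """Group intersection points into table bounding boxes.
--
--     Single pass with running accumulators instead of materialized clusters.
--     Like the original, sorts `intersections` in place.
--     """
--     if not intersections:
--         return []
--
--     intersections.sort()
--     tables = []
--
--     x0, y0 = intersections[0]
--     min_x = max_x = last_x = x0
--     min_y = max_y = last_y = y0
--     count = 1
--
--     for x, y in intersections[1:]: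
--         if abs(x - last_x) < 100 and abs(y - last_y) < 100:
--             if x < min_x:
--                 min_x = x
--             if x > max_x:
--                 max_x = x
--             if y < min_y:
--                 min_y = y
--             if y > max_y:
--                 max_y = y
--             count += 1
--         else:
--             if count > 4:
--                 tables.append((min_x, min_y, max_x - min_x, max_y - min_y))
--             min_x = max_x = x
--             min_y = max_y = y
--             count = 1
--         last_x, last_y = x, y
--
--     if count > 4:
--         tables.append((min_x, min_y, max_x - min_x, max_y - min_y))
--
--     return tables
-- ===== Notes on version B (the rewrite author's own statement) =====
-- stated objective: simpler
-- what changed: Replaces the materialized list-of-clusters and the second box-building pass (with per-cluster min/max list scans) by a single pass that maintains running count/min/max accumulators and emits each bounding box directly, using O(1) extra state.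
import Mathlib
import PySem

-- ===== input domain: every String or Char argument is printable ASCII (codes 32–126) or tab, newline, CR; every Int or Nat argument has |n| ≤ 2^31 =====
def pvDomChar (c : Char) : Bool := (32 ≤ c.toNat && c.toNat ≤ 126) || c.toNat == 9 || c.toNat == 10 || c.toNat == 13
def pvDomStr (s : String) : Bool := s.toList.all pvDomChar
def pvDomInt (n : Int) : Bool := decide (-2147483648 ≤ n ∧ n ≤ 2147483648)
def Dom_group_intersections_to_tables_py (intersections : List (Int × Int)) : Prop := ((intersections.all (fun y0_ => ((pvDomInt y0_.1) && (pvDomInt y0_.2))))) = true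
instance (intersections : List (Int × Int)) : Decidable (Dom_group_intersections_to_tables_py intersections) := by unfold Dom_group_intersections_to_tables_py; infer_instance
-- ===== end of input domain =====

-- B replaces A's materialized clusters + second box-building pass by one pass with running
-- count/min/max accumulators (simpler, O(1) extra state). Python A sorts its argument in
-- place; B performs the same in-place sort; the equivalence proved here is about the RETURN value.

-- ===== PORT A =====
-- Python's min/max over a nonempty int list (first element, folded; 0 case unreachable here)
def pvMinList : List Int → Int
  | [] => 0
  | h :: t => t.foldl min h

def pvMaxList : List Int → Int
  | [] => 0
  | h :: t => t.foldl max h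

-- the box built for one cluster in A's final loop
def pvBox (cluster : List (Int × Int)) : Int × Int × Int × Int :=
  let xs := cluster.map Prod.fst
  let ys := cluster.map Prod.snd
  (pvMinList xs, pvMinList ys, pvMaxList xs - pvMinList xs, pvMaxList ys - pvMinList ys)

-- A's clustering loop: walks the remaining sorted points carrying current_cluster and clusters,
-- including the final `if len(current_cluster) > 4` check after the loop
def pvLoopA : List (Int × Int) → List (Int × Int) → List (List (Int × Int)) → List (List (Int × Int))
  | [], cur, clusters => if cur.length > 4 then clusters ++ [cur] else clusters
  | (x, y) :: rest, cur, clusters =>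
    let last := cur.getLastD (0, 0)
    if |x - last.1| < 100 ∧ |y - last.2| < 100 then
      pvLoopA rest (cur ++ [(x, y)]) clusters
    else
      if cur.length > 4 then pvLoopA rest [(x, y)] (clusters ++ [cur])
      else pvLoopA rest [(x, y)] clusters

def group_intersections_to_tables_py (intersections : List (Int × Int)) : List (Int × Int × Int × Int) :=
  if intersections = [] then []
  else
    match PySem.List.sorted2 intersections Prod.fst Prod.snd with
    | [] => []
    | p :: rest =>
      let clusters := pvLoopA rest [p] []
      clusters.foldl (fun tables c => tables ++ [pvBox c]) []

-- ===== PORT B =====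
-- B's single pass: running min/max/count accumulators, last point, and the output so far
def pvLoopB : List (Int × Int) → Int → Int → Int → Int → Nat → Int → Int →
    List (Int × Int × Int × Int) → List (Int × Int × Int × Int)
  | [], mnx, mxx, mny, mxy, cnt, _, _, tables =>
    if cnt > 4 then tables ++ [(mnx, mny, mxx - mnx, mxy - mny)] else tables
  | (x, y) :: rest, mnx, mxx, mny, mxy, cnt, lx, ly, tables =>
    if |x - lx| < 100 ∧ |y - ly| < 100 then
      pvLoopB rest (if x < mnx then x else mnx) (if x > mxx then x else mxx)
        (if y < mny then y else mny) (if y > mxy then y else mxy) (cnt + 1) x y tables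
    else
      pvLoopB rest x x y y 1 x y
        (if cnt > 4 then tables ++ [(mnx, mny, mxx - mnx, mxy - mny)] else tables)

def group_intersections_to_tables_py_alt (intersections : List (Int × Int)) : List (Int × Int × Int × Int) :=
  if intersections = [] then []
  else
    match PySem.List.sorted2 intersections Prod.fst Prod.snd with
    | [] => []
    | (x0, y0) :: rest => pvLoopB rest x0 x0 y0 y0 1 x0 y0 []

-- ===== PRECONDITION & SPEC =====
def Spec_group_intersections_to_tables_py (intersections : List (Int × Int)) (out : List (Int × Int × Int × Int)) : Prop := out = group_intersections_to_tables_py_alt intersections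
instance (intersections : List (Int × Int)) (out : List (Int × Int × Int × Int)) : Decidable (Spec_group_intersections_to_tables_py intersections out) := by unfold Spec_group_intersections_to_tables_py; infer_instance

-- ===== CLAIM (what is proved, stated in full; the proofs are below) =====
def Claim_equal_group_intersections_to_tables_py : Prop := ∀ (intersections : List (Int × Int)), Dom_group_intersections_to_tables_py intersections → Spec_group_intersections_to_tables_py intersections (group_intersections_to_tables_py intersections)

-- ===== LEMMAS AND PROOFS =====

theorem pvMinList_append (xs : List Int) (x : Int) (h : xs ≠ []) :
    pvMinList (xs ++ [x]) = min (pvMinList xs) x := by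
  cases xs with
  | nil => exact absurd rfl h
  | cons a t => simp [pvMinList, List.foldl_append]

theorem pvMaxList_append (xs : List Int) (x : Int) (h : xs ≠ []) :
    pvMaxList (xs ++ [x]) = max (pvMaxList xs) x := by
  cases xs with
  | nil => exact absurd rfl h
  | cons a t => simp [pvMaxList, List.foldl_append]

theorem foldl_box (clusters : List (List (Int × Int))) (acc : List (Int × Int × Int × Int)) :
    clusters.foldl (fun tables c => tables ++ [pvBox c]) acc = acc ++ clusters.map pvBox := by
  induction clusters generalizing acc with
  | nil => simp
  | cons c cs ih => simp [List.foldl_cons, ih, List.append_assoc]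

-- main invariant: pvLoopB with accumulators describing the current cluster equals
-- mapping pvBox over pvLoopA's clusters
theorem loop_invariant (rest : List (Int × Int)) :
    ∀ (cur : List (Int × Int)) (clusters : List (List (Int × Int))), cur ≠ [] →
    pvLoopB rest (pvMinList (cur.map Prod.fst)) (pvMaxList (cur.map Prod.fst))
      (pvMinList (cur.map Prod.snd)) (pvMaxList (cur.map Prod.snd)) cur.length
      (cur.getLastD (0, 0)).1 (cur.getLastD (0, 0)).2 (clusters.map pvBox)
      = (pvLoopA rest cur clusters).map pvBox := by
  induction rest with
  | nil =>
    intro cur clusters _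
    by_cases h : cur.length > 4 <;> simp [pvLoopB, pvLoopA, h, pvBox]
  | cons p rest ih =>
    intro cur clusters hc
    obtain ⟨x, y⟩ := p
    simp only [pvLoopB, pvLoopA]
    split
    · -- close: extend the cluster
      have hmapf : (cur ++ [(x, y)]).map Prod.fst = cur.map Prod.fst ++ [x] := by simp
      have hmaps : (cur ++ [(x, y)]).map Prod.snd = cur.map Prod.snd ++ [y] := by simp
      have hne1 : cur.map Prod.fst ≠ [] := by simpa using hc
      have hne2 : cur.map Prod.snd ≠ [] := by simpa using hc
      have := ih (cur ++ [(x, y)]) clusters (by simp)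
      rw [hmapf, hmaps, pvMinList_append _ _ hne1, pvMaxList_append _ _ hne1,
          pvMinList_append _ _ hne2, pvMaxList_append _ _ hne2] at this
      simp only [List.getLastD_concat, List.length_append, List.length_cons,
        List.length_nil] at this
      have hmin : ∀ a b : Int, (if b < a then b else a) = min a b := by
        intro a b; split <;> omega
      have hmax : ∀ a b : Int, (if b > a then b else a) = max a b := by
        intro a b; split <;> omega
      rw [hmin, hmax, hmin, hmax]
      simpa using this
    · -- far: flush (maybe) and restart from (x, y)
      by_cases h : cur.length > 4
      · rw [if_pos h, if_pos h]
        have hnew := ih [(x, y)] (clusters ++ [cur]) (by simp)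
        simp only [List.map_cons, List.map_nil, pvMinList, pvMaxList, List.foldl_nil,
          List.length_cons, List.length_nil, List.getLastD, List.map_append] at hnew
        simpa [pvBox] using hnew
      · rw [if_neg h, if_neg h]
        have hnew := ih [(x, y)] clusters (by simp)
        simpa [pvMinList, pvMaxList, List.getLastD] using hnew

-- ===== VERDICT (by name: the statement is the Claim_ definition above) =====
theorem group_intersections_to_tables_py_spec : Claim_equal_group_intersections_to_tables_py := by
  intro intersections _
  unfold Spec_group_intersections_to_tables_py
  unfold group_intersections_to_tables_py group_intersections_to_tables_py_alt
  split
  · rfl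
  · cases hs : PySem.List.sorted2 intersections Prod.fst Prod.snd with
    | nil => rfl
    | cons p rest =>
      obtain ⟨x0, y0⟩ := p
      have := loop_invariant rest [(x0, y0)] [] (by simp)
      simp only [List.map_cons, List.map_nil, pvMinList, pvMaxList, List.foldl_nil,
        List.length_cons, List.length_nil, List.getLastD, List.getLast_singleton,
        Nat.zero_add] at this
      show (pvLoopA rest [(x0, y0)] []).foldl (fun tables c => tables ++ [pvBox c]) []
          = pvLoopB rest x0 x0 y0 y0 1 x0 y0 []
      rw [foldl_box, List.nil_append, ← this]
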